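-- pv_equiv track=rewrite | github.com/AndreaDiMartin/ParcialLengujesPr | Examen 2/FunRecursiva.py | formulaRecursivaColaAux
-- ===== SOURCE A (Python) =====
-- def formulaRecursivaColaAux(n,a,b,c,lista,contador):
--     if contador == n+1:
--         return a+b+c
--     else:
--         #Podemos ver que se utiliza una lógica similar a la formula iterativa
--         a = lista[contador-6]
--         b = lista[contador-12]
--         c = lista[contador-18]
--         lista[contador] = a+b+c
--         return formulaRecursivaColaAux(n,a,b,c,lista,contador+1)
-- ===== SOURCE B (Python) =====
-- def formulaRecursivaColaAux(n, a, b, c, lista, contador):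
--     # Different decomposition: no (a, b, c) accumulators at all. Fill lista over a
--     # for-range and read the final answer back from lista[n]; same in-place mutation.
--     if contador == n + 1:
--         return a + b + c
--     for i in range(contador, n + 1):
--         lista[i] = lista[i - 6] + lista[i - 12] + lista[i - 18]
--     return lista[n]
-- ===== Notes on version B (the rewrite author's own statement) =====
-- stated objective: alternative
-- what changed: B drops the (a,b,c) accumulator state entirely: it fills lista[i] for i in range(contador, n+1) with a for-loop over indices and reads the answer back from lista[n], instead of threading a,b,c through a tail recursion and returning them at the base case.
import Mathlib
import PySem

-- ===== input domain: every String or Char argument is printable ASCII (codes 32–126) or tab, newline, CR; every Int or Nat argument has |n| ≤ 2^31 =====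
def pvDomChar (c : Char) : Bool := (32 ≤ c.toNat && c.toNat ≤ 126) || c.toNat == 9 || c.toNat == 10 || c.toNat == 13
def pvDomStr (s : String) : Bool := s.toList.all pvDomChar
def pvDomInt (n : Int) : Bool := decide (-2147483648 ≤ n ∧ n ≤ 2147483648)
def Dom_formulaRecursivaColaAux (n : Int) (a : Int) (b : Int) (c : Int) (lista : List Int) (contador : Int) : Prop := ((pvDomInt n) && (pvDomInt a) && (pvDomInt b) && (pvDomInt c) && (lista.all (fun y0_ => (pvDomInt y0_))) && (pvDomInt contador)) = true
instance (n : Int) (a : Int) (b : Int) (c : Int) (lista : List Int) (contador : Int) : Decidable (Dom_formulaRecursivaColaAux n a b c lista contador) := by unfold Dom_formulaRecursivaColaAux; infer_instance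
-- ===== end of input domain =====

-- B drops the (a,b,c) accumulators: it fills lista over a for-range loop and reads the
-- result back from lista[n]; return-value equivalence (both mutate lista identically).


-- ===== PORT A =====
-- A's tail recursion; fuel (n+1-contador).toNat is exactly the number of Python calls
-- left before the `contador == n+1` base case (a guard making the recursion total;
-- 0-returns correspond to Python IndexError / infinite recursion, excluded by Pre_).
def pvGoA (fuel : Nat) (n : Int) (a : Int) (b : Int) (c : Int) (lista : List Int) (contador : Int) : Int :=
  if contador = n + 1 then a + b + c
  else
    match fuel with
    | 0 => 0
    | fuel' + 1 =>
      match PySem.List.pyGet? lista (contador - 6),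
            PySem.List.pyGet? lista (contador - 12),
            PySem.List.pyGet? lista (contador - 18) with
      | some a', some b', some c' =>
        match PySem.List.pySet? lista contador (a' + b' + c') with
        | some lista' => pvGoA fuel' n a' b' c' lista' (contador + 1)
        | none => 0
      | _, _, _ => 0

def formulaRecursivaColaAux (n : Int) (a : Int) (b : Int) (c : Int) (lista : List Int) (contador : Int) : Int :=
  pvGoA (n + 1 - contador).toNat n a b c lista contador

-- ===== PORT B =====
-- one body of B's for-loop: `lista[i] = lista[i-6] + lista[i-12] + lista[i-18]`;
-- none = the body raised IndexError (then the fold stays none)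
def pvStepB (st : Option (List Int)) (i : Int) : Option (List Int) := do
  let l ← st
  let x ← PySem.List.pyGet? l (i - 6)
  let y ← PySem.List.pyGet? l (i - 12)
  let z ← PySem.List.pyGet? l (i - 18)
  PySem.List.pySet? l i (x + y + z)

def formulaRecursivaColaAux_alt (n : Int) (a : Int) (b : Int) (c : Int) (lista : List Int) (contador : Int) : Int :=
  if contador = n + 1 then a + b + c
  else
    match (PySem.List.pyRange contador (n + 1) 1).foldl pvStepB (some lista) with
    | some l =>
      match PySem.List.pyGet? l n with
      | some v => v
      | none => 0
    | none => 0

-- ===== PRECONDITION & SPEC =====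
-- Pre_ is exactly where Python A returns normally: either the base case fires at once,
-- or every iteration i ∈ [contador, n] has all three reads (smallest index i-18 ≥ -len)
-- and the write (largest index n < len) in Python's index range.
def Pre_formulaRecursivaColaAux (n : Int) (a : Int) (b : Int) (c : Int) (lista : List Int) (contador : Int) : Prop :=
  contador = n + 1 ∨ (contador ≤ n ∧ 18 - (lista.length : Int) ≤ contador ∧ n < (lista.length : Int))
instance (n : Int) (a : Int) (b : Int) (c : Int) (lista : List Int) (contador : Int) : Decidable (Pre_formulaRecursivaColaAux n a b c lista contador) := by unfold Pre_formulaRecursivaColaAux; infer_instance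

def pvWitness_formulaRecursivaColaAux : Int × Int × Int × Int × List Int × Int :=
  (2, 0, 0, 0, [1, 1, 1, 1, 1, 1, 1, 1, 1, 1, 1, 1, 1, 1, 1, 1, 1, 1, 1, 1], 0)

def Spec_formulaRecursivaColaAux (n : Int) (a : Int) (b : Int) (c : Int) (lista : List Int) (contador : Int) (out : Int) : Prop := out = formulaRecursivaColaAux_alt n a b c lista contador
instance (n : Int) (a : Int) (b : Int) (c : Int) (lista : List Int) (contador : Int) (out : Int) : Decidable (Spec_formulaRecursivaColaAux n a b c lista contador out) := by unfold Spec_formulaRecursivaColaAux; infer_instance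

-- ===== CLAIM (what is proved, stated in full; the proofs are below) =====
def Claim_equal_formulaRecursivaColaAux : Prop := ∀ (n : Int) (a : Int) (b : Int) (c : Int) (lista : List Int) (contador : Int), Dom_formulaRecursivaColaAux n a b c lista contador → Pre_formulaRecursivaColaAux n a b c lista contador → Spec_formulaRecursivaColaAux n a b c lista contador (formulaRecursivaColaAux n a b c lista contador)

-- ===== LEMMAS AND PROOFS =====

theorem pvStepB_none (i : Int) : pvStepB none i = none := rfl

theorem foldl_pvStepB_none (l : List Int) : l.foldl pvStepB none = none := by
  induction l with
  | nil => rfl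
  | cons x xs ih => simpa [List.foldl, pvStepB_none] using ih

-- a successful pySet? is a List.set at the effective index: it reads back and keeps length
theorem pySet?_read_back (l l' : List Int) (i v : Int) (h : PySem.List.pySet? l i v = some l') :
    PySem.List.pyGet? l' i = some v ∧ l'.length = l.length := by
  simp only [PySem.List.pySet?, PySem.List.pyIdx?] at h
  simp only [PySem.List.pyGet?, PySem.List.pyIdx?]
  split at h <;> rename_i hsign
  · by_cases hlt : i < (l.length : Int)
    · simp only [if_pos hlt] at h
      simp only [Option.map_some, Option.some.injEq] at h
      subst h
      refine ⟨?_, by simp⟩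
      simp [if_pos hsign, hlt, List.getElem?_set]
      omega
    · simp [if_neg hlt] at h
  · by_cases hge : -(l.length : Int) ≤ i
    · simp only [if_pos hge] at h
      simp only [Option.map_some, Option.some.injEq] at h
      subst h
      refine ⟨?_, by simp⟩
      simp [if_neg hsign, hge, List.getElem?_set]
      omega
    · simp [if_neg hge] at h

-- Core invariant: for contador ≤ n with exact fuel, A's recursion computes the value that
-- B's fold leaves at position n (or 0 if some access fails on both sides).
theorem pvGoA_eq_fold (fuel : Nat) : ∀ (n a b c : Int) (lista : List Int) (contador : Int),
    contador ≤ n → fuel = (n + 1 - contador).toNat →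
    pvGoA fuel n a b c lista contador =
      (match (PySem.List.pyRange contador (n + 1) 1).foldl pvStepB (some lista) with
       | some l => (match PySem.List.pyGet? l n with | some v => v | none => 0)
       | none => 0) := by
  induction fuel with
  | zero => intro n a b c lista contador hle hf; omega
  | succ fuel' ih =>
    intro n a b c lista contador hle hf
    have hne : contador ≠ n + 1 := by omega
    rw [pvGoA, if_neg hne, PySem.List.pyRange_one_cons (by omega)]
    rw [List.foldl_cons]
    cases h1 : PySem.List.pyGet? lista (contador - 6) <;>
      cases h2 : PySem.List.pyGet? lista (contador - 12) <;>
        cases h3 : PySem.List.pyGet? lista (contador - 18) <;>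
          simp [pvStepB, h1, h2, h3, foldl_pvStepB_none]
    rename_i a' b' c'
    cases h4 : PySem.List.pySet? lista contador (a' + b' + c') <;>
      simp [foldl_pvStepB_none]
    rename_i lista'
    by_cases hlast : contador = n
    · subst hlast
      rw [PySem.List.pyRange_one_eq_nil (le_refl (contador + 1))]
      simp only [List.foldl_nil]
      rw [(pySet?_read_back lista lista' contador (a' + b' + c') h4).1]
      unfold pvGoA
      rw [if_pos rfl]
    · exact ih n a' b' c' lista' (contador + 1) (by omega) (by omega)

-- ===== VERDICT (by name: the statement is the Claim_ definition above) =====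
theorem formulaRecursivaColaAux_spec : Claim_equal_formulaRecursivaColaAux := by
  intro n a b c lista contador _ hpre
  unfold Spec_formulaRecursivaColaAux formulaRecursivaColaAux formulaRecursivaColaAux_alt
  by_cases h : contador = n + 1
  · simp [h, pvGoA]
  · rw [if_neg h]
    rcases hpre with h' | ⟨hle, _, _⟩
    · exact absurd h' h
    · exact pvGoA_eq_fold _ n a b c lista contador hle rfl
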